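-- pv_equiv track=rewrite | github.com/sunilsoni/interview-notes-python | com/interview/2025/october/test1/test2.py | solution
-- ===== SOURCE A (Python) =====
-- from collections import Counter
--
-- def solution(a, b, queries):
--     cntA = Counter(a)
--     cntB = Counter(b)
--     out = []
--     for q in queries:
--         if q[0] == 0:
--             _, i, x = q
--             old = a[i]
--             new = old + x
--             cntA[old] -= 1
--             if cntA[old] == 0:
--                 del cntA[old]
--             a[i] = new
--             cntA[new] += 1
--         else:
--             _, x = q
--             total = 0
--             for vb, cb in cntB.items():
--                 total += cb * cntA.get(x - vb, 0)
--             out.append(total)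
--     return out
-- ===== SOURCE B (Python) =====
-- from collections import Counter
--
-- def solution(a, b, queries):
--     # Maintain pairsum[s] = number of pairs (i, j) with a[i] + b[j] == s,
--     # built once and adjusted on each point update; queries become O(1) lookups.
--     cntA = Counter(a)
--     cntB = Counter(b)
--     pairsum = {}
--     for vb, cb in cntB.items():
--         for va, ca in cntA.items():
--             s = va + vb
--             pairsum[s] = pairsum.get(s, 0) + ca * cb
--     out = []
--     for q in queries:
--         if q[0] == 0:
--             i, x = q[1], q[2]
--             old = a[i]
--             new = old + x
--             a[i] = new
--             for vb, cb in cntB.items():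
--                 pairsum[old + vb] = pairsum.get(old + vb, 0) - cb
--                 pairsum[new + vb] = pairsum.get(new + vb, 0) + cb
--         else:
--             out.append(pairsum.get(q[1], 0))
--     return out
-- ===== Notes on version B (the rewrite author's own statement) =====
-- stated objective: alternative
-- what changed: B maintains a dict pairsum[s] = current number of pairs (i,j) with a[i]+b[j]=s, built once from the two Counters and adjusted on each point update by a loop over the distinct values of b, so each type-1 query becomes a single O(1) dict lookup instead of A's per-query scan over all distinct values of b.
import Mathlib
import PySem

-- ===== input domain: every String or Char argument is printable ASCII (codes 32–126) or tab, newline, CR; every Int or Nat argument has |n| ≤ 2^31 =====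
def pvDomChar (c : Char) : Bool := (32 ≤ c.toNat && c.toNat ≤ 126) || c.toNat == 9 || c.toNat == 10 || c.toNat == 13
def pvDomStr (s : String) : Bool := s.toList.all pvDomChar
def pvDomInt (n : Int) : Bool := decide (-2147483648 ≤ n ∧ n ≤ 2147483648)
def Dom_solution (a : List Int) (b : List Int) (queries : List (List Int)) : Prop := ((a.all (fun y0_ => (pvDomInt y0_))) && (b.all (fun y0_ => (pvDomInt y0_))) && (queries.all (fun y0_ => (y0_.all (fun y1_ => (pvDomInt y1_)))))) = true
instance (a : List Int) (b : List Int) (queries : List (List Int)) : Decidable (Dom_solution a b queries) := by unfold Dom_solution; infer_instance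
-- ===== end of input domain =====

-- B maintains a pair-sum table adjusted on each update so queries are O(1) lookups
-- (A rescans the distinct values of b on every query); return values proved equal,
-- and both A and B mutate the caller's list `a` in the same way (a[i] = a[i] + x).

-- ===== PORT A =====
def stepA (cntB : PySem.Dict Int Int) (st : PySem.Dict Int Int × List Int × List Int)
    (q : List Int) : PySem.Dict Int Int × List Int × List Int :=
  if PySem.List.pyGetD q 0 0 = 0 then
    let i := PySem.List.pyGetD q 1 0
    let x := PySem.List.pyGetD q 2 0
    let old := PySem.List.pyGetD st.2.1 i 0
    let nw := old + x
    let c1 := st.1.insert old (st.1.getD old 0 - 1)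
    let c2 := if c1.getD old 0 = 0 then c1.erase old else c1
    let a' := PySem.List.pySetD st.2.1 i nw
    let c3 := c2.insert nw (c2.getD nw 0 + 1)
    (c3, a', st.2.2)
  else
    let x := PySem.List.pyGetD q 1 0
    let total := cntB.items.foldl (fun t p => t + p.2 * st.1.getD (x - p.1) 0) 0
    (st.1, st.2.1, st.2.2 ++ [total])

def solution (a : List Int) (b : List Int) (queries : List (List Int)) : List Int :=
  (queries.foldl (stepA (PySem.Dict.counter b)) (PySem.Dict.counter a, a, ([] : List Int))).2.2

-- ===== PORT B =====
def buildPS (cntA cntB : PySem.Dict Int Int) : PySem.Dict Int Int :=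
  cntB.items.foldl (fun ps p =>
    cntA.items.foldl (fun ps2 r =>
      ps2.insert (r.1 + p.1) (ps2.getD (r.1 + p.1) 0 + r.2 * p.2)) ps) PySem.Dict.empty

def stepB (cntB : PySem.Dict Int Int) (st : PySem.Dict Int Int × List Int × List Int)
    (q : List Int) : PySem.Dict Int Int × List Int × List Int :=
  if PySem.List.pyGetD q 0 0 = 0 then
    let i := PySem.List.pyGetD q 1 0
    let x := PySem.List.pyGetD q 2 0
    let old := PySem.List.pyGetD st.2.1 i 0
    let nw := old + x
    let a' := PySem.List.pySetD st.2.1 i nw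
    let ps := cntB.items.foldl (fun ps p =>
      let ps1 := ps.insert (old + p.1) (ps.getD (old + p.1) 0 - p.2)
      ps1.insert (nw + p.1) (ps1.getD (nw + p.1) 0 + p.2)) st.1
    (ps, a', st.2.2)
  else
    (st.1, st.2.1, st.2.2 ++ [st.1.getD (PySem.List.pyGetD q 1 0) 0])

def solution_alt (a : List Int) (b : List Int) (queries : List (List Int)) : List Int :=
  (queries.foldl (stepB (PySem.Dict.counter b))
     (buildPS (PySem.Dict.counter a) (PySem.Dict.counter b), a, ([] : List Int))).2.2

-- ===== PRECONDITION & SPEC =====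
-- Pre_ excludes only the inputs on which the Python A raises: a malformed query
-- (wrong length for its tag, or empty) or an update index outside Python's range
-- [-len(a), len(a)).  A returns on everything else.
def Pre_solution (a : List Int) (b : List Int) (queries : List (List Int)) : Prop :=
  ∀ q ∈ queries,
    (q.length = 3 ∧ q.getD 0 0 = 0 ∧ -(a.length : Int) ≤ q.getD 1 0 ∧ q.getD 1 0 < (a.length : Int)) ∨
    (q.length = 2 ∧ q.getD 0 0 ≠ 0)
instance (a : List Int) (b : List Int) (queries : List (List Int)) : Decidable (Pre_solution a b queries) := by unfold Pre_solution; infer_instance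

def pvWitness_solution : List Int × List Int × List (List Int) :=
  ([1, 2], [3], [[1, 4], [0, 0, 1], [1, 5], [0, -1, -2], [1, 3]])

def Spec_solution (a : List Int) (b : List Int) (queries : List (List Int)) (out : List Int) : Prop := out = solution_alt a b queries
instance (a : List Int) (b : List Int) (queries : List (List Int)) (out : List Int) : Decidable (Spec_solution a b queries out) := by unfold Spec_solution; infer_instance

-- ===== CLAIM (what is proved, stated in full; the proofs are below) =====
def Claim_equal_solution : Prop := ∀ (a : List Int) (b : List Int) (queries : List (List Int)), Dom_solution a b queries → Pre_solution a b queries → Spec_solution a b queries (solution a b queries)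

-- ===== LEMMAS AND PROOFS =====

-- the pair-sum weight function both loop invariants are phrased with:
-- W b a s = sum over the distinct values vb of b of (count of vb in b) * (count of (s-vb) in a)
def W (b a : List Int) (s : Int) : Int :=
  ((PySem.Dict.counter b).items.map (fun p => p.2 * (a.count (s - p.1) : Int))).sum

lemma find?_filter_ne (t : List (Int × Int)) (k v : Int) (hvk : v ≠ k) :
    List.find? (fun p => p.1 == v) (t.filter (fun p => !(p.1 == k)))
      = List.find? (fun p => p.1 == v) t := by
  induction t with
  | nil => rfl
  | cons q t ih =>
    by_cases hq : q.1 = k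
    · rw [List.filter_cons_of_neg (by simp [hq]),
         List.find?_cons_of_neg (by rw [hq]; simp [show k ≠ v from fun h => hvk h.symm])]
      exact ih
    · by_cases hv : q.1 = v
      · rw [List.filter_cons_of_pos (by simp [hq]),
           List.find?_cons_of_pos (by simp [hv]), List.find?_cons_of_pos (by simp [hv])]
      · rw [List.filter_cons_of_pos (by simp [hq]),
           List.find?_cons_of_neg (by simp [hv]), List.find?_cons_of_neg (by simp [hv])]
        exact ih

lemma getD_erase (d : PySem.Dict Int Int) (k v : Int) :
    (d.erase k).getD v 0 = if v = k then 0 else d.getD v 0 := by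
  obtain ⟨l⟩ := d
  simp only [PySem.Dict.erase, PySem.Dict.getD, PySem.Dict.get?]
  by_cases hvk : v = k
  · subst hvk
    have hnone : List.find? (fun p => p.1 == v) (l.filter fun p => !(p.1 == v)) = none := by
      apply List.find?_eq_none.mpr
      intro x hx
      have := (List.mem_filter.mp hx).2
      simpa using this
    simp [hnone]
  · rw [find?_filter_ne l k v hvk]
    simp [hvk]

lemma foldl_getD_add {γ : Type} (l : List γ) (f : PySem.Dict Int Int → γ → PySem.Dict Int Int)
    (δ : γ → Int → Int) (hf : ∀ d k s, (f d k).getD s 0 = d.getD s 0 + δ k s)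
    (d : PySem.Dict Int Int) (s : Int) :
    (l.foldl f d).getD s 0 = d.getD s 0 + (l.map (fun k => δ k s)).sum := by
  induction l generalizing d with
  | nil => simp
  | cons k t ih => simp [List.foldl_cons, ih, hf, add_assoc]

lemma hit_sum (l : List Int) (hnd : l.Nodup) (c : Int) (w : Int → Int) :
    (l.map (fun k => if k = c then w k else 0)).sum = if c ∈ l then w c else 0 := by
  induction l with
  | nil => simp
  | cons h t ih =>
    rcases List.nodup_cons.mp hnd with ⟨hht, hnt⟩
    by_cases hc : h = c
    · subst hc
      simp [ih hnt, hht]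
    · rw [List.map_cons, List.sum_cons, if_neg hc, ih hnt, zero_add]
      have hch : c ≠ h := fun h' => hc h'.symm
      simp [List.mem_cons, hch]

lemma idx_spec {α : Type} [Inhabited α] (xs : List α) (i : Int) (d v : α)
    (h0 : -(xs.length : Int) ≤ i) (h1 : i < (xs.length : Int)) :
    ∃ j : Nat, ∃ hj : j < xs.length,
      PySem.List.pyGetD xs i d = xs[j] ∧ PySem.List.pySetD xs i v = xs.set j v := by
  unfold PySem.List.pyGetD PySem.List.pyGet? PySem.List.pySetD PySem.List.pySet? PySem.List.pyIdx?
  by_cases hi : 0 ≤ i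
  · have hj : i.toNat < xs.length := by omega
    exact ⟨i.toNat, hj, by simp [hi, h1], by simp [hi, h1]⟩
  · have hj : xs.length - (-i).toNat < xs.length := by omega
    refine ⟨xs.length - (-i).toNat, hj, ?_, ?_⟩ <;>
      simp [hi, h0, List.getElem?_eq_getElem hj]

lemma count_set_int (xs : List Int) (j : Nat) (hj : j < xs.length) (v u : Int) :
    (((xs.set j v).count u : Int))
      = (xs.count u : Int) + (if u = v then 1 else 0) - (if u = xs[j] then 1 else 0) := by
  have hcs := List.count_set (l := xs) (i := j) (a := v) (b := u) hj
  simp only [beq_iff_eq] at hcs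
  have hpos : xs[j] = u → 1 ≤ xs.count u := fun h =>
    List.count_pos_iff.mpr (h ▸ xs.getElem_mem hj)
  split_ifs with h2 h1 h1
  · rw [if_pos h1.symm, if_pos h2.symm] at hcs
    have := hpos h1.symm; omega
  · rw [if_neg (fun h => h1 h.symm), if_pos h2.symm] at hcs
    omega
  · rw [if_pos h1.symm, if_neg (fun h => h2 h.symm)] at hcs
    have := hpos h1.symm; omega
  · rw [if_neg (fun h => h1 h.symm), if_neg (fun h => h2 h.symm)] at hcs
    omega

lemma W_set (b a : List Int) (j : Nat) (hj : j < a.length) (nw s : Int) :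
    W b (a.set j nw) s
      = W b a s + (((PySem.Dict.counter b).items.map
          (fun p => (if a[j] + p.1 = s then -p.2 else 0) + (if nw + p.1 = s then p.2 else 0))).sum) := by
  unfold W
  rw [← List.sum_map_add]
  congr 1
  apply List.map_congr_left
  intro p _
  rw [count_set_int a j hj nw (s - p.1)]
  have e1 : (s - p.1 = nw) ↔ (nw + p.1 = s) := by constructor <;> (intro h; omega)
  have e2 : (s - p.1 = a[j]) ↔ (a[j] + p.1 = s) := by constructor <;> (intro h; omega)
  simp only [e1, e2]
  split_ifs <;> ring

lemma buildPS_getD (a b : List Int) (s : Int) :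
    (buildPS (PySem.Dict.counter a) (PySem.Dict.counter b)).getD s 0 = W b a s := by
  have hinner : ∀ (p : Int × Int) (d : PySem.Dict Int Int) (s' : Int),
      ((PySem.Dict.counter a).items.foldl
        (fun ps2 r => ps2.insert (r.1 + p.1) (ps2.getD (r.1 + p.1) 0 + r.2 * p.2)) d).getD s' 0
        = d.getD s' 0 + ((PySem.Dict.counter a).items.map
            (fun r => if r.1 + p.1 = s' then r.2 * p.2 else 0)).sum := by
    intro p d s'
    apply foldl_getD_add
    intro d' r t
    rw [PySem.Dict.getD_insert]
    split_ifs with ha hb hb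
    · subst ha; ring
    · exact absurd ha.symm hb
    · exact absurd hb.symm ha
    · simp
  unfold buildPS
  rw [foldl_getD_add _ _
    (fun p s' => ((PySem.Dict.counter a).items.map
      (fun r => if r.1 + p.1 = s' then r.2 * p.2 else 0)).sum)
    (fun d p s' => hinner p d s')]
  rw [PySem.Dict.getD_empty, zero_add]
  unfold W
  apply congrArg List.sum
  apply List.map_congr_left
  intro p _
  rw [PySem.Dict.items_counter, List.map_map]
  have hcomp : ((fun r : Int × Int => if r.1 + p.1 = s then r.2 * p.2 else 0) ∘
      (fun k : Int => (k, (a.count k : Int))))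
      = (fun k : Int => if k = s - p.1 then (a.count k : Int) * p.2 else 0) := by
    funext k
    simp only [Function.comp]
    by_cases h : k = s - p.1
    · rw [if_pos (by omega), if_pos h]
    · rw [if_neg (by omega), if_neg h]
  rw [hcomp, hit_sum _ (PySem.Set.nodup_ofList a) (s - p.1)]
  by_cases hm : (s - p.1) ∈ a
  · rw [if_pos ((PySem.Set.mem_ofList a _).mpr hm)]
    ring
  · rw [if_neg (fun hh => hm ((PySem.Set.mem_ofList a _).mp hh))]
    have hc0 : a.count (s - p.1) = 0 := List.count_eq_zero.mpr hm
    rw [hc0]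
    simp

lemma pyGetD0 (q0 : Int) (t : List Int) : PySem.List.pyGetD (q0 :: t) 0 0 = q0 := by
  simp [PySem.List.pyGetD, PySem.List.pyGet?, PySem.List.pyIdx?]

lemma pyGetD1 (q0 q1 : Int) (t : List Int) : PySem.List.pyGetD (q0 :: q1 :: t) 1 0 = q1 := by
  norm_num [PySem.List.pyGetD, PySem.List.pyGet?, PySem.List.pyIdx?]

lemma pyGetD2 (q0 q1 q2 : Int) (t : List Int) :
    PySem.List.pyGetD (q0 :: q1 :: q2 :: t) 2 0 = q2 := by
  simp only [PySem.List.pyGetD, PySem.List.pyGet?, PySem.List.pyIdx?, List.length_cons]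
  rw [if_pos (by omega), if_pos (by push_cast; omega)]
  simp

-- A's Counter update preserves the count invariant
lemma cntA_update (cntA : PySem.Dict Int Int) (a : List Int) (j : Nat) (hj : j < a.length)
    (x : Int) (hA : ∀ v, cntA.getD v 0 = (a.count v : Int)) :
    ∀ v, (((if (cntA.insert a[j] (cntA.getD a[j] 0 - 1)).getD a[j] 0 = 0
          then (cntA.insert a[j] (cntA.getD a[j] 0 - 1)).erase a[j]
          else cntA.insert a[j] (cntA.getD a[j] 0 - 1)).insert (a[j] + x)
            ((if (cntA.insert a[j] (cntA.getD a[j] 0 - 1)).getD a[j] 0 = 0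
              then (cntA.insert a[j] (cntA.getD a[j] 0 - 1)).erase a[j]
              else cntA.insert a[j] (cntA.getD a[j] 0 - 1)).getD (a[j] + x) 0 + 1)).getD v 0)
      = ((a.set j (a[j] + x)).count v : Int) := by
  have hc1 : ∀ v, (cntA.insert a[j] (cntA.getD a[j] 0 - 1)).getD v 0
      = if v = a[j] then (a.count a[j] : Int) - 1 else (a.count v : Int) := by
    intro v
    rw [PySem.Dict.getD_insert]
    split_ifs with h
    · rw [hA a[j]]
    · rw [hA v]
  have hc2 : ∀ v, (if (cntA.insert a[j] (cntA.getD a[j] 0 - 1)).getD a[j] 0 = 0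
        then (cntA.insert a[j] (cntA.getD a[j] 0 - 1)).erase a[j]
        else cntA.insert a[j] (cntA.getD a[j] 0 - 1)).getD v 0
      = if v = a[j] then (a.count a[j] : Int) - 1 else (a.count v : Int) := by
    intro v
    by_cases hz : (cntA.insert a[j] (cntA.getD a[j] 0 - 1)).getD a[j] 0 = 0
    · rw [if_pos hz, getD_erase]
      rw [hc1 a[j], if_pos rfl] at hz
      by_cases h : v = a[j]
      · rw [if_pos h, if_pos h]; omega
      · rw [if_neg h, if_neg h, hc1 v, if_neg h]
    · rw [if_neg hz]; exact hc1 v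
  intro v
  rw [PySem.Dict.getD_insert, count_set_int a j hj (a[j] + x) v, hc2 v, hc2 (a[j] + x)]
  split_ifs <;> simp_all

-- B's pairsum update preserves the W invariant
lemma ps_update (b : List Int) (ps : PySem.Dict Int Int) (a : List Int) (j : Nat)
    (hj : j < a.length) (x : Int) (hB : ∀ s, ps.getD s 0 = W b a s) :
    ∀ s, ((PySem.Dict.counter b).items.foldl (fun d p =>
        let ps1 := d.insert (a[j] + p.1) (d.getD (a[j] + p.1) 0 - p.2)
        ps1.insert ((a[j] + x) + p.1) (ps1.getD ((a[j] + x) + p.1) 0 + p.2)) ps).getD s 0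
      = W b (a.set j (a[j] + x)) s := by
  intro s
  rw [foldl_getD_add _ _
    (fun p s' => (if a[j] + p.1 = s' then -p.2 else 0) + (if (a[j] + x) + p.1 = s' then p.2 else 0))
    ?hf, hB s, W_set b a j hj (a[j] + x) s]
  case hf =>
    intro d p s'
    show ((d.insert (a[j] + p.1) (d.getD (a[j] + p.1) 0 - p.2)).insert ((a[j] + x) + p.1)
        ((d.insert (a[j] + p.1) (d.getD (a[j] + p.1) 0 - p.2)).getD ((a[j] + x) + p.1) 0 + p.2)).getD s' 0
      = d.getD s' 0 + ((if a[j] + p.1 = s' then -p.2 else 0) + (if (a[j] + x) + p.1 = s' then p.2 else 0))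
    rw [PySem.Dict.getD_insert, PySem.Dict.getD_insert, PySem.Dict.getD_insert]
    by_cases h2 : s' = (a[j] + x) + p.1
    · subst h2
      by_cases h1 : (a[j] + x) + p.1 = a[j] + p.1
      · rw [if_pos rfl, if_pos h1, if_pos h1.symm, if_pos rfl, ← h1]
        ring
      · rw [if_pos rfl, if_neg h1, if_neg (fun h => h1 h.symm), if_pos rfl]
        ring
    · rw [if_neg h2]
      by_cases h1 : s' = a[j] + p.1
      · subst h1
        rw [if_pos rfl, if_pos rfl, if_neg (fun h => h2 h.symm)]
        ring
      · rw [if_neg h1, if_neg (fun h => h1 h.symm), if_neg (fun h => h2 h.symm)]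
        ring

-- the main loop invariant: after any prefix of well-formed queries with equal list
-- state and invariant-respecting tables, both folds produce the same outputs
lemma main_inv (b : List Int) (queries : List (List Int)) :
    ∀ (n : Nat) (cntA ps : PySem.Dict Int Int) (a out : List Int), a.length = n →
    (∀ q ∈ queries,
      (q.length = 3 ∧ q.getD 0 0 = 0 ∧ -(n : Int) ≤ q.getD 1 0 ∧ q.getD 1 0 < (n : Int)) ∨
      (q.length = 2 ∧ q.getD 0 0 ≠ 0)) →
    (∀ v, cntA.getD v 0 = (a.count v : Int)) →
    (∀ s, ps.getD s 0 = W b a s) →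
    (queries.foldl (stepA (PySem.Dict.counter b)) (cntA, a, out)).2.2
      = (queries.foldl (stepB (PySem.Dict.counter b)) (ps, a, out)).2.2 := by
  induction queries with
  | nil => intro n cntA ps a out _ _ _ _; rfl
  | cons q qs ih =>
    intro n cntA ps a out ha hq hA hB
    have hqs := fun q' hq' => hq q' (List.mem_cons_of_mem _ hq')
    rcases hq q (List.mem_cons_self) with ⟨h3, h0, hlo, hhi⟩ | ⟨h2, h0⟩
    · -- update query [0, i, x]
      obtain ⟨q0, q1, q2, rfl⟩ := List.length_eq_three.mp h3
      have hq0 : q0 = 0 := by simpa using h0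
      subst hq0
      have hlo' : -(a.length : Int) ≤ q1 := by rw [ha]; simpa using hlo
      have hhi' : q1 < (a.length : Int) := by rw [ha]; simpa using hhi
      obtain ⟨j, hj, hget, hset⟩ :=
        idx_spec a q1 0 (PySem.List.pyGetD a q1 0 + q2) hlo' hhi'
      rw [List.foldl_cons, List.foldl_cons]
      have hsA : stepA (PySem.Dict.counter b) (cntA, a, out) [0, q1, q2]
          = ((if (cntA.insert a[j] (cntA.getD a[j] 0 - 1)).getD a[j] 0 = 0
              then (cntA.insert a[j] (cntA.getD a[j] 0 - 1)).erase a[j]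
              else cntA.insert a[j] (cntA.getD a[j] 0 - 1)).insert (a[j] + q2)
                ((if (cntA.insert a[j] (cntA.getD a[j] 0 - 1)).getD a[j] 0 = 0
                  then (cntA.insert a[j] (cntA.getD a[j] 0 - 1)).erase a[j]
                  else cntA.insert a[j] (cntA.getD a[j] 0 - 1)).getD (a[j] + q2) 0 + 1),
             a.set j (a[j] + q2), out) := by
        simp only [stepA, pyGetD0, pyGetD1, pyGetD2]
        rw [hget] at hset
        rw [hget, hset]
        exact if_pos trivial
      have hsB : stepB (PySem.Dict.counter b) (ps, a, out) [0, q1, q2]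
          = ((PySem.Dict.counter b).items.foldl (fun d p =>
              let ps1 := d.insert (a[j] + p.1) (d.getD (a[j] + p.1) 0 - p.2)
              ps1.insert ((a[j] + q2) + p.1) (ps1.getD ((a[j] + q2) + p.1) 0 + p.2)) ps,
             a.set j (a[j] + q2), out) := by
        simp only [stepB, pyGetD0, pyGetD1, pyGetD2]
        rw [hget] at hset
        rw [hget, hset]
        exact if_pos trivial
      rw [hsA, hsB]
      exact ih n _ _ (a.set j (a[j] + q2)) out (by simpa using ha) hqs
        (cntA_update cntA a j hj q2 hA) (ps_update b ps a j hj q2 hB)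
    · -- sum query [t, x] with t ≠ 0
      obtain ⟨q0, q1, rfl⟩ := List.length_eq_two.mp h2
      have hq0 : q0 ≠ 0 := by simpa using h0
      rw [List.foldl_cons, List.foldl_cons]
      have htot : (PySem.Dict.counter b).items.foldl
          (fun t p => t + p.2 * cntA.getD (q1 - p.1) 0) 0 = ps.getD q1 0 := by
        rw [PySem.List.foldl_add ((PySem.Dict.counter b).items)
          (fun p => p.2 * cntA.getD (q1 - p.1) 0) 0, hB q1, zero_add]
        unfold W
        apply congrArg List.sum
        apply List.map_congr_left
        intro p _
        rw [hA (q1 - p.1)]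
      have hsA : stepA (PySem.Dict.counter b) (cntA, a, out) [q0, q1]
          = (cntA, a, out ++ [ps.getD q1 0]) := by
        simp only [stepA, pyGetD0, pyGetD1, if_neg hq0]
        rw [htot]
      have hsB : stepB (PySem.Dict.counter b) (ps, a, out) [q0, q1]
          = (ps, a, out ++ [ps.getD q1 0]) := by
        simp only [stepB, pyGetD0, pyGetD1, if_neg hq0]
      rw [hsA, hsB]
      exact ih n cntA ps a (out ++ [ps.getD q1 0]) ha hqs hA hB

-- ===== VERDICT (by name: the statement is the Claim_ definition above) =====
theorem solution_spec : Claim_equal_solution := by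
  intro a b queries _hdom hpre
  unfold Spec_solution solution solution_alt
  exact main_inv b queries a.length (PySem.Dict.counter a)
    (buildPS (PySem.Dict.counter a) (PySem.Dict.counter b)) a [] rfl hpre
    (fun v => PySem.Dict.getD_counter a v) (fun s => buildPS_getD a b s)
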